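-- pv_equiv track=rewrite | github.com/arpit150/Translator-with-google-api | func.py | special_break
-- ===== SOURCE A (Python) =====
-- def special_break(word):
--     check = True
--     check_word = 'special'
--     a=''
--     for i in word:
--         if i.isalpha():
--             current_word = 'special'
--         else:
--             current_word = 'extra'
--         if check_word ==current_word:
--             a = a+i
--         else:
--             a=a+'τ'
--             a=a+i
--         check_word=current_word
--     return a.strip('τ')
-- ===== SOURCE B (Python) =====
-- def special_break(word):
--     # run-based: cut the word into maximal same-category runs, then join with the separator
--     runs = []
--     rest = word
--     while rest:
--         k = rest[0].isalpha()
--         j = 1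
--         while j < len(rest) and rest[j].isalpha() == k:
--             j += 1
--         runs.append(rest[:j])
--         rest = rest[j:]
--     return 'τ'.join(runs).strip('τ')
-- ===== Notes on version B (the rewrite author's own statement) =====
-- stated objective: alternative
-- what changed: Replaces the char-by-char previous-category state machine with a run-based pass: cut the word into maximal same-category slices, then join the runs with the separator and strip it.
import Mathlib
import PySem

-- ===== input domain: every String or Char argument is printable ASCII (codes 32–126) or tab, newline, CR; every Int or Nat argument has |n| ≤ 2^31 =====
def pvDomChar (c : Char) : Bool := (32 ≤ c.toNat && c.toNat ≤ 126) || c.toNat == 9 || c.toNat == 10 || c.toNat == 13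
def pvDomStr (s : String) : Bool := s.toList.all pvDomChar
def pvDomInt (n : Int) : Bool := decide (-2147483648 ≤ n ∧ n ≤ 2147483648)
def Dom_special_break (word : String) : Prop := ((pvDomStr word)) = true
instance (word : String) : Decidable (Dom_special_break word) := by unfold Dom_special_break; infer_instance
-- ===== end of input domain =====

-- B replaces A's char-by-char previous-category state machine with a run-splitting pass
-- joined by the separator; same return value, same cost (objective: alternative).

-- ===== PORT A =====
def special_break (word : String) : String :=
  let st := word.toList.foldl
    (fun (st : String × List Char) i =>
      let current_word := if PySem.Chars.isalpha i then "special" else "extra"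
      let a := if st.1 == current_word then st.2 ++ [i] else st.2 ++ ['τ'] ++ [i]
      (current_word, a))
    ("special", [])
  String.mk (PySem.Chars.stripChars st.2 ['τ'])

-- ===== PORT B =====
-- the inner while loop of Source B: the maximal same-category run is rest[:j] = head :: takeWhile, the tail rest[j:] = dropWhile
def sbRuns : List Char → List (List Char)
  | [] => []
  | c :: rest =>
      (c :: rest.takeWhile (fun d => PySem.Chars.isalpha d == PySem.Chars.isalpha c))
        :: sbRuns (rest.dropWhile (fun d => PySem.Chars.isalpha d == PySem.Chars.isalpha c))
  termination_by cs => cs.length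
  decreasing_by
    simp only [List.length_cons]
    exact Nat.lt_succ_of_le (List.length_dropWhile_le _ _)

def special_break_alt (word : String) : String :=
  String.mk (PySem.Chars.stripChars (PySem.Chars.join ['τ'] (sbRuns word.toList)) ['τ'])

-- ===== PRECONDITION & SPEC =====
def Spec_special_break (word : String) (out : String) : Prop := out = special_break_alt word
instance (word : String) (out : String) : Decidable (Spec_special_break word out) := by unfold Spec_special_break; infer_instance

-- ===== CLAIM (what is proved, stated in full; the proofs are below) =====
def Claim_equal_special_break : Prop := ∀ (word : String), Dom_special_break word → Spec_special_break word (special_break word)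

-- ===== LEMMAS AND PROOFS =====

-- proof-only characterisation of A's loop body: the emitted characters after state category k
def sbSep (k : Bool) : List Char → List Char
  | [] => []
  | c :: cs =>
      (if PySem.Chars.isalpha c == k then [] else ['τ']) ++ c :: sbSep (PySem.Chars.isalpha c) cs

lemma sb_fold_eq (cs : List Char) : ∀ (k : Bool) (acc : List Char),
    (cs.foldl
      (fun (st : String × List Char) i =>
        let current_word := if PySem.Chars.isalpha i then "special" else "extra"
        let a := if st.1 == current_word then st.2 ++ [i] else st.2 ++ ['τ'] ++ [i]
        (current_word, a))
      ((if k then "special" else "extra"), acc)).2 = acc ++ sbSep k cs := by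
  induction cs with
  | nil => intro k acc; simp [sbSep]
  | cons c cs ih =>
    intro k acc
    simp only [List.foldl_cons, sbSep]
    cases hc : PySem.Chars.isalpha c <;> cases k
    · simpa [hc] using ih false (acc ++ [c])
    · simpa [hc] using ih false (acc ++ ['τ'] ++ [c])
    · simpa [hc] using ih true (acc ++ ['τ'] ++ [c])
    · simpa [hc] using ih true (acc ++ [c])

lemma sb_fold_eq' (cs : List Char) (acc : List Char) :
    (cs.foldl
      (fun (st : String × List Char) i =>
        let current_word := if PySem.Chars.isalpha i then "special" else "extra"
        let a := if st.1 == current_word then st.2 ++ [i] else st.2 ++ ['τ'] ++ [i]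
        (current_word, a))
      ("special", acc)).2 = acc ++ sbSep true cs := by
  simpa using sb_fold_eq cs true acc

lemma sb_join_head (sep : List Char) (c : Char) (r : List Char) (rest : List (List Char)) :
    PySem.Chars.join sep ((c :: r) :: rest) = c :: PySem.Chars.join sep (r :: rest) := by
  cases rest <;> simp [PySem.Chars.join, List.intercalate, List.intersperse]

lemma sb_join_sep (c : Char) (r : List Char) (rest : List (List Char)) :
    PySem.Chars.join ['τ'] ([c] :: r :: rest) = c :: 'τ' :: PySem.Chars.join ['τ'] (r :: rest) := by
  simp [PySem.Chars.join, List.intercalate, List.intersperse]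

lemma sb_sep_eq_join (cs : List Char) : ∀ (c : Char),
    c :: sbSep (PySem.Chars.isalpha c) cs = PySem.Chars.join ['τ'] (sbRuns (c :: cs)) := by
  induction cs with
  | nil => intro c; simp [sbSep, sbRuns, PySem.Chars.join, List.intercalate]  -- nil case
  | cons c₂ cs₂ ih =>
    intro c
    have hrun := ih c₂
    by_cases h : PySem.Chars.isalpha c₂ = PySem.Chars.isalpha c
    · -- same category: c joins the first run of (c₂ :: cs₂)
      rw [sbRuns] at hrun ⊢
      rw [h] at hrun
      simp only [List.takeWhile_cons, List.dropWhile_cons, h, beq_self_eq_true, if_true]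
      rw [sbSep]
      simp only [h, beq_self_eq_true, if_true, List.nil_append]
      rw [sb_join_head]
      exact congrArg (c :: ·) hrun
    · -- category change: [c] is its own run, the separator precedes the rest
      have hb : (PySem.Chars.isalpha c₂ == PySem.Chars.isalpha c) = false := by simpa using h
      rw [sbRuns, sbSep]
      simp only [List.takeWhile_cons, List.dropWhile_cons, hb, Bool.false_eq_true,
        if_false, List.singleton_append]
      rw [sbRuns] at hrun ⊢
      rw [sb_join_sep, ← hrun]

lemma sb_stripChars_tau (x : List Char) :
    PySem.Chars.stripChars ('τ' :: x) ['τ'] = PySem.Chars.stripChars x ['τ'] := by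
  simp [PySem.Chars.stripChars]

-- ===== VERDICT (by name: the statement is the Claim_ definition above) =====
theorem special_break_spec : Claim_equal_special_break := by
  intro word _
  unfold Spec_special_break special_break special_break_alt
  simp only []
  rw [sb_fold_eq']
  cases hcs : word.toList with
  | nil => simp [sbRuns, sbSep, PySem.Chars.join, List.intercalate]
  | cons c cs =>
    rw [sbSep, sb_sep_eq_join cs c]
    cases hc : PySem.Chars.isalpha c
    · rw [if_neg (by simp [hc]), List.singleton_append, List.nil_append, sb_stripChars_tau]
    · simp
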